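-- pv_equiv track=rewrite | github.com/Macmer88/Django | Ejercicios_integradores.py | palabra_mas_repetida
-- ===== SOURCE A (Python) =====
-- def palabra_mas_repetida(diccionario):
--     palabra_mas_comun = None
--     frecuencia_mas_alta = 0
--
--     for palabra, frecuencia in diccionario.items():
--         if frecuencia > frecuencia_mas_alta:
--             palabra_mas_comun = palabra
--             frecuencia_mas_alta = frecuencia
--
--     return (palabra_mas_comun, frecuencia_mas_alta)
-- ===== SOURCE B (Python) =====
-- def palabra_mas_repetida(diccionario):
--     mejor = max(diccionario.values(), default=0)
--     if mejor <= 0: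
--         return (None, 0)
--     for palabra, frecuencia in diccionario.items():
--         if frecuencia == mejor:
--             return (palabra, mejor)
--     return (None, 0)  # unreachable: mejor > 0 is one of the values
-- ===== Notes on version B (the rewrite author's own statement) =====
-- stated objective: alternative
-- what changed: B replaces A's single-pass running-argmax accumulator by a two-phase scheme: compute the maximum frequency with max(values, default=0), then scan for the first key carrying it, falling back to the no-word result when that maximum is not positive.
import Mathlib
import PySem

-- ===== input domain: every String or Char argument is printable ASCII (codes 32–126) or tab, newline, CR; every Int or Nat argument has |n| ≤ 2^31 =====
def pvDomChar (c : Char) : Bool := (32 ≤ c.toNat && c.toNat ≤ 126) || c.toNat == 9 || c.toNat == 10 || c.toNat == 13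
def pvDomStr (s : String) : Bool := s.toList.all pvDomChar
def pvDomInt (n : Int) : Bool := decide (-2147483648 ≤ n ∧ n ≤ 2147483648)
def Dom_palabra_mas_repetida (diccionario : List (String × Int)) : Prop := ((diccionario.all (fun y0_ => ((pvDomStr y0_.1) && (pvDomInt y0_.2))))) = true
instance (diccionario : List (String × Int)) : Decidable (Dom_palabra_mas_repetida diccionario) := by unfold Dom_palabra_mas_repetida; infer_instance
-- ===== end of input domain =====

-- B computes the maximum frequency first (max with default 0) and then scans for the
-- first key carrying it, instead of A's single-pass running-argmax accumulator;
-- objective: alternative decomposition of the same O(n) task.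


-- ===== PORT A =====
-- A: one loop keeping (palabra_mas_comun, frecuencia_mas_alta), updating on strict '>'
def palabra_mas_repetida (diccionario : List (String × Int)) : Option String × Int :=
  diccionario.foldl
    (fun st kv => if kv.2 > st.2 then (some kv.1, kv.2) else st)
    ((none : Option String), (0 : Int))

-- ===== PORT B =====
-- B's search loop: first pair whose frequency equals mejor (the trailing return (None, 0))
def pvFindMejor (mejor : Int) : List (String × Int) → Option String × Int
  | [] => (none, 0)
  | kv :: t => if kv.2 == mejor then (some kv.1, mejor) else pvFindMejor mejor t

def palabra_mas_repetida_alt (diccionario : List (String × Int)) : Option String × Int :=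
  let mejor : Int :=
    match PySem.List.max? (diccionario.map Prod.snd) (fun y => y) with
    | none => 0
    | some m => m
  if mejor ≤ 0 then (none, 0) else pvFindMejor mejor diccionario

-- ===== PRECONDITION & SPEC =====
def Spec_palabra_mas_repetida (diccionario : List (String × Int)) (out : Option String × Int) : Prop := out = palabra_mas_repetida_alt diccionario
instance (diccionario : List (String × Int)) (out : Option String × Int) : Decidable (Spec_palabra_mas_repetida diccionario out) := by unfold Spec_palabra_mas_repetida; infer_instance

-- ===== CLAIM (what is proved, stated in full; the proofs are below) =====
def Claim_equal_palabra_mas_repetida : Prop := ∀ (diccionario : List (String × Int)), Dom_palabra_mas_repetida diccionario → Spec_palabra_mas_repetida diccionario (palabra_mas_repetida diccionario)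

-- ===== LEMMAS AND PROOFS =====

theorem foldl_max_max (t : List Int) (a b : Int) :
    t.foldl max (max a b) = max a (t.foldl max b) := by
  induction t generalizing b with
  | nil => simp
  | cons c t ih => simpa [max_assoc] using ih (max b c)

theorem le_foldl_max (t : List Int) (a : Int) : a ≤ t.foldl max a := by
  induction t generalizing a with
  | nil => simp
  | cons c t ih => exact le_trans (le_max_left a c) (ih (max a c))

-- the heart: A's fold from any accumulator equals "find the running max if it improved"
theorem foldA_eq_find (l : List (String × Int)) (p : Option String) (a : Int) :
    l.foldl (fun st kv => if kv.2 > st.2 then (some kv.1, kv.2) else st) (p, a)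
      = if a < (l.map Prod.snd).foldl max a
          then pvFindMejor ((l.map Prod.snd).foldl max a) l
          else (p, a) := by
  induction l generalizing p a with
  | nil => simp
  | cons kv t ih =>
    obtain ⟨k, v⟩ := kv
    by_cases hva : v > a
    · have hmax : max a v = v := max_eq_right (le_of_lt hva)
      have hMv : v ≤ (t.map Prod.snd).foldl max v := le_foldl_max _ _
      have hcond : a < (t.map Prod.snd).foldl max v := lt_of_lt_of_le hva hMv
      rcases lt_or_eq_of_le hMv with hlt | heq
      · simp [List.foldl_cons, hva, ih, hmax, hcond, hlt, pvFindMejor, ne_of_lt hlt]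
      · simp [List.foldl_cons, hva, ih, hmax, ← heq, pvFindMejor]
    · rw [not_lt] at hva
      have hmax : max a v = a := max_eq_left hva
      by_cases hc : a < (t.map Prod.snd).foldl max a
      · have hne : v ≠ (t.map Prod.snd).foldl max a := ne_of_lt (lt_of_le_of_lt hva hc)
        simp [List.foldl_cons, not_lt.mpr hva, ih, hmax, hc, pvFindMejor, hne]
      · simp [List.foldl_cons, not_lt.mpr hva, ih, hmax, hc]

-- ===== VERDICT (by name: the statement is the Claim_ definition above) =====
theorem palabra_mas_repetida_spec : Claim_equal_palabra_mas_repetida := by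
  intro d _
  unfold Spec_palabra_mas_repetida palabra_mas_repetida palabra_mas_repetida_alt
  cases d with
  | nil => simp [pvFindMejor]
  | cons kv t =>
    obtain ⟨k, v⟩ := kv
    rw [foldA_eq_find]
    have hmax? : PySem.List.max? (v :: t.map Prod.snd) (fun y => y)
        = some ((t.map Prod.snd).foldl max v) :=
      PySem.List.max?_id_cons (x := v) (t := t.map Prod.snd)
    have hM : (t.map Prod.snd).foldl max (max 0 v) = max 0 ((t.map Prod.snd).foldl max v) :=
      foldl_max_max (t.map Prod.snd) 0 v
    simp only [List.map_cons, List.foldl_cons, hmax?, hM]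
    set mejor : Int := (t.map Prod.snd).foldl max v with hm
    by_cases hpos : mejor ≤ 0
    · simp [hpos]
    · rw [not_le] at hpos
      simp [max_eq_right (le_of_lt hpos), hpos, not_le.mpr hpos]
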